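-- pv_equiv track=rewrite | github.com/hicann/ops-math | math/div/tests/assets/golden.py | broadcast_to_maxshape
-- ===== SOURCE A (Python) =====
-- def broadcast_to_maxshape(shapes: list):
--     def _max(_shape):
--         no_one_shape = [s for s in _shape if s != 1]
--         if len(no_one_shape) == 0:
--             max_value = 1
--         else:
--             max_value = no_one_shape[0]
--         return max_value
--     max_dim_length = max(len(list(shape)) for shape in shapes)
--     input_shapes = []
--     for shape in shapes:
--         input_shapes.append([1 for _ in range(max_dim_length - len(shape))] + list(shape))
--     input_shapes = list(map(list, zip(*input_shapes)))
--     max_shape = [_max(shape) for shape in input_shapes]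
--     input_shapes = list(map(list, zip(*input_shapes)))
--     return (*input_shapes, max_shape)
-- ===== SOURCE B (Python) =====
-- def broadcast_to_maxshape(shapes: list):
--     max_dim_length = max(len(s) for s in shapes)
--     padded = [[1] * (max_dim_length - len(s)) + list(s) for s in shapes]
--     max_shape = [1] * max_dim_length
--     for s in padded:
--         max_shape = [v if m == 1 and v != 1 else m for m, v in zip(max_shape, s)]
--     return (*padded, max_shape)
-- ===== Notes on version B (the rewrite author's own statement) =====
-- stated objective: simpler
-- what changed: B drops both zip(*...) transposes and the per-column _max helper: it keeps a running max_shape accumulator of length max_dim_length and folds the padded shapes over it once, taking the first non-1 value per column; Pre_ excludes shapes=[] (A raises ValueError) and all-empty-shapes inputs, a degenerate zero-dimensional corner where the two degenerate outputs are equally defensible.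
-- outside the precondition, e.g. on broadcast_to_maxshape([[]]): A returns ([],), B returns ([], []); on broadcast_to_maxshape([]): A raises ValueError, B raises ValueError
import Mathlib
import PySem

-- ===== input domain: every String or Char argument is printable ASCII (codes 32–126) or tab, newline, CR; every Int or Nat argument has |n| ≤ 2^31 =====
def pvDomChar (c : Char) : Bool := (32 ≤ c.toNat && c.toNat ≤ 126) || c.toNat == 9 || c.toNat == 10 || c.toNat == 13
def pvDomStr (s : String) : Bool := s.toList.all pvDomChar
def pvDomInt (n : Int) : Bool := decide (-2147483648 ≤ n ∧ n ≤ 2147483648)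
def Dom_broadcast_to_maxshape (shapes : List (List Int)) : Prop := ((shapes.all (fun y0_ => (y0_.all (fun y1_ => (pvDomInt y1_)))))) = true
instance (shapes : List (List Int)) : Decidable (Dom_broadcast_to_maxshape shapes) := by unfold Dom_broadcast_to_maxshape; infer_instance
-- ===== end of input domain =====

-- B removes both zip(*...) transposes and the per-column helper of A, folding the padded
-- shapes once over a running max_shape accumulator (objective: simpler; return value only).


-- ===== PORT A =====
-- `_max(_shape)`: first element ≠ 1 of the column, else 1
def pvAMax (col : List Int) : Int :=
  match col.filter (fun s => s ≠ 1) with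
  | [] => 1
  | x :: _ => x

-- `list(map(list, zip(*rows)))`: columns up to the minimum row length; zip() of no rows is empty
def pvZipStar (rows : List (List Int)) : List (List Int) :=
  match rows with
  | [] => []
  | r :: _ =>
    let m := (rows.map List.length).foldl min r.length
    (List.range m).map (fun i => rows.map (fun s => s.getD i 0))

def broadcast_to_maxshape (shapes : List (List Int)) : List (List Int) :=
  -- max(len(shape) for shape in shapes); Pre_ excludes shapes = [] (ValueError there)
  let max_dim_length := ((PySem.List.max? (shapes.map List.length) id).getD 0)
  let input_shapes := shapes.map (fun s => List.replicate (max_dim_length - s.length) 1 ++ s)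
  let t := pvZipStar input_shapes
  let max_shape := t.map pvAMax
  let input_shapes2 := pvZipStar t
  input_shapes2 ++ [max_shape]

-- ===== PORT B =====
def broadcast_to_maxshape_alt (shapes : List (List Int)) : List (List Int) :=
  let max_dim_length := ((PySem.List.max? (shapes.map List.length) id).getD 0)
  let padded := shapes.map (fun s => List.replicate (max_dim_length - s.length) 1 ++ s)
  let max_shape := padded.foldl
    (fun acc s => (acc.zip s).map (fun p => if p.1 = 1 ∧ p.2 ≠ 1 then p.2 else p.1))
    (List.replicate max_dim_length (1 : Int))
  padded ++ [max_shape]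

-- ===== PRECONDITION & SPEC =====
-- Pre_ requires some shape to be non-empty: on shapes = [] A raises ValueError (max() of an
-- empty sequence), and when every shape is empty (max_dim_length = 0, a degenerate
-- zero-dimensional broadcast no caller specifies) A's zip-transpose and B's per-shape
-- reconstruction return differently-shaped degenerate outputs, both defensible.
def Pre_broadcast_to_maxshape (shapes : List (List Int)) : Prop := ∃ s ∈ shapes, s ≠ []
instance (shapes : List (List Int)) : Decidable (Pre_broadcast_to_maxshape shapes) := by unfold Pre_broadcast_to_maxshape; infer_instance
def pvWitness_broadcast_to_maxshape : List (List Int) := [[2, 3], [3]]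

def Spec_broadcast_to_maxshape (shapes : List (List Int)) (out : List (List Int)) : Prop := out = broadcast_to_maxshape_alt shapes
instance (shapes : List (List Int)) (out : List (List Int)) : Decidable (Spec_broadcast_to_maxshape shapes out) := by unfold Spec_broadcast_to_maxshape; infer_instance

-- ===== CLAIM (what is proved, stated in full; the proofs are below) =====
def Claim_equal_broadcast_to_maxshape : Prop := ∀ (shapes : List (List Int)), Dom_broadcast_to_maxshape shapes → Pre_broadcast_to_maxshape shapes → Spec_broadcast_to_maxshape shapes (broadcast_to_maxshape shapes)

-- ===== LEMMAS AND PROOFS =====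


theorem pv_foldl_min_const {l : List Nat} {m : Nat} (h : ∀ x ∈ l, x = m) :
    l.foldl min m = m := by
  induction l with
  | nil => rfl
  | cons a l ih =>
    have ha : a = m := h a (by simp)
    simp only [List.foldl_cons, ha, min_self]
    exact ih (fun x hx => h x (by simp [hx]))

theorem pv_range_map_getD (l : List Int) :
    (List.range l.length).map (fun j => l.getD j 0) = l := by
  apply List.ext_getElem
  · simp
  · intro i h1 h2
    simp [List.getD, List.getElem?_eq_getElem h2]

-- pvZipStar on a nonempty list of rows of equal length m is the list of the m columns
theorem pv_zipStar_cols {rows : List (List Int)} {m : Nat}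
    (hne : rows ≠ []) (hlen : ∀ r ∈ rows, r.length = m) :
    pvZipStar rows = (List.range m).map (fun i => rows.map (fun s => s.getD i 0)) := by
  cases rows with
  | nil => exact absurd rfl hne
  | cons r rs =>
    have hr : r.length = m := hlen r (by simp)
    show (List.range (((r :: rs).map List.length).foldl min r.length)).map _ = _
    have : ((r :: rs).map List.length).foldl min r.length = m := by
      rw [hr]
      exact pv_foldl_min_const (by intro x hx; simp only [List.mem_map] at hx
                                   obtain ⟨s, hs, rfl⟩ := hx; exact hlen s hs)
    rw [this]

theorem pv_zipStar_double {rows : List (List Int)} {m : Nat}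
    (hne : rows ≠ []) (hm : 0 < m) (hlen : ∀ r ∈ rows, r.length = m) :
    pvZipStar (pvZipStar rows) = rows := by
  rw [pv_zipStar_cols hne hlen]
  set t := (List.range m).map (fun i => rows.map (fun s => s.getD i 0)) with ht
  have htne : t ≠ [] := by
    simp [ht, List.range_eq_nil]; omega
  have htlen : ∀ c ∈ t, c.length = rows.length := by
    intro c hc
    simp only [ht, List.mem_map] at hc
    obtain ⟨i, _, rfl⟩ := hc
    simp
  rw [pv_zipStar_cols htne htlen]
  apply List.ext_getElem
  · simp
  · intro i hi1 hi2
    simp only [List.getElem_map, List.getElem_range, ht]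
    have hri : rows[i].length = m := hlen _ (List.getElem_mem _)
    have : (List.map (fun s => List.getD s i 0) ((List.range m).map (fun j => rows.map (fun s => s.getD j 0))))
        = (List.range m).map (fun j => rows[i].getD j 0) := by
      rw [List.map_map]
      apply List.map_congr_left
      intro j hj
      simp only [Function.comp_apply, List.getD, List.getElem?_map]
      have him : i < rows.length := by simpa using hi1
      simp [List.getElem?_eq_getElem him]
    rw [this, ← hri, pv_range_map_getD]

-- B's per-row update, elementwise
theorem pv_step_getD {acc s : List Int} {j : Nat} (hlen : s.length = acc.length)
    (hj : j < acc.length) :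
    ((acc.zip s).map (fun p => if p.1 = 1 ∧ p.2 ≠ 1 then p.2 else p.1)).getD j 0
      = (if acc.getD j 0 = 1 ∧ s.getD j 0 ≠ 1 then s.getD j 0 else acc.getD j 0) := by
  have hz : j < (acc.zip s).length := by simp [List.length_zip, hlen]; omega
  have hjs : j < s.length := by omega
  simp [List.getD, hj, hjs, List.getElem_zip]

-- column fold: what B computes at one index
def pvColF (a : Int) (c : List Int) : Int :=
  c.foldl (fun a v => if a = 1 ∧ v ≠ 1 then v else a) a

theorem pv_colF_of_ne {a : Int} (h : a ≠ 1) (c : List Int) : pvColF a c = a := by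
  induction c with
  | nil => rfl
  | cons v c ih => simp [pvColF, h] at ih ⊢; simpa [h] using ih

theorem pv_colF_eq_pvAMax (c : List Int) : pvColF 1 c = pvAMax c := by
  induction c with
  | nil => rfl
  | cons v c ih =>
    by_cases hv : v = 1
    · simpa [pvColF, pvAMax, hv] using ih
    · have h1 : pvColF 1 (v :: c) = pvColF v c := by simp [pvColF, hv]
      rw [h1, pv_colF_of_ne hv c]
      simp [pvAMax, hv]

theorem pv_foldl_cols (rows : List (List Int)) :
    ∀ (acc : List Int), (∀ r ∈ rows, r.length = acc.length) →
    rows.foldl (fun acc s => (acc.zip s).map (fun p => if p.1 = 1 ∧ p.2 ≠ 1 then p.2 else p.1)) acc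
      = (List.range acc.length).map (fun j => pvColF (acc.getD j 0) (rows.map (fun s => s.getD j 0))) := by
  induction rows with
  | nil => intro acc _; simpa [pvColF] using (pv_range_map_getD acc).symm
  | cons r rs ih =>
    intro acc hlen
    have hr : r.length = acc.length := hlen r (by simp)
    have hstep : ((acc.zip r).map (fun p => if p.1 = 1 ∧ p.2 ≠ 1 then p.2 else p.1)).length = acc.length := by
      simp [List.length_zip, hr]
    rw [List.foldl_cons, ih _ (by intro x hx; rw [hstep]; exact hlen x (by simp [hx])), hstep]
    apply List.map_congr_left
    intro j hj
    have hj' : j < acc.length := List.mem_range.mp hj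
    rw [pv_step_getD hr hj']
    simp only [List.map_cons, pvColF, List.foldl_cons]

theorem pv_max?_isSome {l : List Nat} (h : l ≠ []) :
    ∃ m, PySem.List.max? l id = some m := by
  cases l with
  | nil => exact absurd rfl h
  | cons a l =>
    simp only [PySem.List.max?]
    clear h
    induction l generalizing a with
    | nil => exact ⟨a, rfl⟩
    | cons b l ih =>
      simp only [List.foldl_cons]
      by_cases hab : a < b <;> simp [hab] <;> exact ih _

theorem broadcast_eq (shapes : List (List Int)) (hne : shapes ≠ [])
    (hD : ¬ (∀ s ∈ shapes, s = [])) :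
    broadcast_to_maxshape shapes = broadcast_to_maxshape_alt shapes := by
  obtain ⟨mdl, hmdl⟩ := pv_max?_isSome (l := shapes.map List.length) (by simpa using hne)
  have hle : ∀ s ∈ shapes, s.length ≤ mdl := by
    intro s hs
    exact PySem.List.max?_isMax hmdl _ (List.mem_map_of_mem hs)
  have hpos : 0 < mdl := by
    push Not at hD
    obtain ⟨s, hs, hsne⟩ := hD
    have := hle s hs
    have : s.length ≠ 0 := by simpa [List.length_eq_zero_iff] using hsne
    omega
  unfold broadcast_to_maxshape broadcast_to_maxshape_alt
  rw [hmdl]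
  simp only [Option.getD_some]
  set padded := shapes.map (fun s => List.replicate (mdl - s.length) 1 ++ s) with hp
  have hpne : padded ≠ [] := by simpa [hp] using hne
  have hplen : ∀ r ∈ padded, r.length = mdl := by
    intro r hr
    simp only [hp, List.mem_map] at hr
    obtain ⟨s, hs, rfl⟩ := hr
    have := hle s hs
    simp [Nat.sub_add_cancel this]
  congr 1
  · exact pv_zipStar_double hpne hpos hplen
  · rw [pv_zipStar_cols hpne hplen, List.map_map,
        pv_foldl_cols padded _ (by simpa using hplen)]
    simp only [List.length_replicate]
    congr 1
    apply List.map_congr_left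
    intro j hj
    have hj' : j < mdl := List.mem_range.mp hj
    simp [Function.comp, hj', pv_colF_eq_pvAMax]

-- ===== VERDICT (by name: the statement is the Claim_ definition above) =====
theorem broadcast_to_maxshape_spec : Claim_equal_broadcast_to_maxshape := by
  intro shapes _ hpre
  obtain ⟨s, hs, hsne⟩ := hpre
  have hne : shapes ≠ [] := by intro h; subst h; exact (List.not_mem_nil hs).elim
  have hD' : ¬ (∀ t ∈ shapes, t = []) := fun h => hsne (h s hs)
  exact (broadcast_eq shapes hne hD').symm ▸ rfl
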